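-- pv_equiv track=rewrite | github.com/gibgibik/go-lineage2-cuda | python/main.py | merge_line
-- ===== SOURCE A (Python) =====
-- def merge_line(line):
--     x_tol = 10
--     if not line:
--         return []
--     merged = [line[0]]
--     for r in line[1:]:
--         last = merged[-1]
--         if r[0] - last[2] <= x_tol:
--             merged[-1] = [
--                 min(last[0], r[0]),
--                 min(last[1], r[1]),
--                 max(last[2], r[2]),
--                 max(last[3], r[3]),
--             ]
--         else:
--             merged.append(r)
--     return merged
-- ===== SOURCE B (Python) =====
-- def merge_line(line):
--     x_tol = 10
--     # pass 1: split into groups of boxes whose x-extents chain within x_tol,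
--     # tracking the running max x2 of the current group
--     groups = []
--     run_max = None
--     for b in line:
--         if groups and b[0] - run_max <= x_tol:
--             groups[-1].append(b)
--             run_max = max(run_max, b[2])
--         else:
--             groups.append([b])
--             run_max = b[2]
--     # pass 2: reduce each group; a singleton keeps its original box
--     out = []
--     for g in groups:
--         if len(g) == 1:
--             out.append(g[0])
--         else:
--             out.append([
--                 min(b[0] for b in g),
--                 min(b[1] for b in g),
--                 max(b[2] for b in g),
--                 max(b[3] for b in g),
--             ])
--     return out
-- ===== Notes on version B (the rewrite author's own statement) =====
-- stated objective: alternative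
-- what changed: B replaces A's single fold that repeatedly rebuilds the trailing merged box with a two-pass group-then-reduce: pass 1 partitions the boxes into chains using a running max-x2, pass 2 reduces each multi-box group to its elementwise min/min/max/max (singletons kept verbatim).
-- outside the precondition, e.g. on merge_line([[1, 2]]): A returns [[1, 2]], B raises IndexError
import Mathlib
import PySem

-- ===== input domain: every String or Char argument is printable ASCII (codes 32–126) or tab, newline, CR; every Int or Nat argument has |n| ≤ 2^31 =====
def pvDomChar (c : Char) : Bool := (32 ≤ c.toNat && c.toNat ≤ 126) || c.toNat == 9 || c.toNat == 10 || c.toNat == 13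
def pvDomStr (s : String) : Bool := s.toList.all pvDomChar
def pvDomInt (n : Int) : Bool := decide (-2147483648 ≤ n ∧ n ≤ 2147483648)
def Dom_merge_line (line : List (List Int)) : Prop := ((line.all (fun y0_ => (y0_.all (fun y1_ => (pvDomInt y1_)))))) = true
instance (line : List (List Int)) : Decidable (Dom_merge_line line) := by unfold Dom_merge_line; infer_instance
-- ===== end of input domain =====

-- B merges the line by a two-pass group-then-reduce instead of A's single fold; return values proved equal on Pre_.

-- ===== PORT A =====
-- loop body of A: last = merged[-1]; merge into it or append r
def stepA (merged : List (List Int)) (r : List Int) : List (List Int) :=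
  let last := PySem.List.pyGetD merged (-1) []   -- merged[-1]; merged is never empty in A's loop
  if PySem.List.pyGetD r 0 0 - PySem.List.pyGetD last 2 0 ≤ 10 then
    -- merged[-1] = [...] : replace the last element
    merged.dropLast ++ [[min (PySem.List.pyGetD last 0 0) (PySem.List.pyGetD r 0 0),
                         min (PySem.List.pyGetD last 1 0) (PySem.List.pyGetD r 1 0),
                         max (PySem.List.pyGetD last 2 0) (PySem.List.pyGetD r 2 0),
                         max (PySem.List.pyGetD last 3 0) (PySem.List.pyGetD r 3 0)]]
  else merged ++ [r]

def merge_line (line : List (List Int)) : List (List Int) :=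
  match line with
  | [] => []
  | h :: t => t.foldl stepA [h]

-- ===== PORT B =====
-- pass 1 body: state = (groups, run_max); run_max starts as a dummy 0 (Python's None), unread while groups = []
def stepB : List (List (List Int)) × Int → List Int → List (List (List Int)) × Int
  | (groups, runMax), b =>
    if groups ≠ [] ∧ PySem.List.pyGetD b 0 0 - runMax ≤ 10 then
      (groups.dropLast ++ [groups.getLastD [] ++ [b]], max runMax (PySem.List.pyGetD b 2 0))
    else (groups ++ [[b]], PySem.List.pyGetD b 2 0)

-- min(...)/max(...) of a nonempty generator, ported as a fold (the [] case is unreachable in B)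
def redMin : List Int → Int
  | [] => 0
  | h :: t => t.foldl min h
def redMax : List Int → Int
  | [] => 0
  | h :: t => t.foldl max h

-- pass 2 body: singleton group keeps its original box
def renderGroup (g : List (List Int)) : List Int :=
  if g.length = 1 then g.headD []
  else [redMin (g.map fun b => PySem.List.pyGetD b 0 0),
        redMin (g.map fun b => PySem.List.pyGetD b 1 0),
        redMax (g.map fun b => PySem.List.pyGetD b 2 0),
        redMax (g.map fun b => PySem.List.pyGetD b 3 0)]

def merge_line_alt (line : List (List Int)) : List (List Int) :=
  ((line.foldl stepB ([], 0)).1).map renderGroup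

-- ===== PRECONDITION & SPEC =====
-- Pre_ excludes lists containing a box with fewer than 4 coordinates: A (and B) raise IndexError on
-- essentially all of them, except that when the missing coordinates are never touched (a single short
-- box, or length-3 boxes that never merge) A accidentally returns the list unchanged.
def Pre_merge_line (line : List (List Int)) : Prop :=
  ∀ b ∈ line, 4 ≤ b.length
instance (line : List (List Int)) : Decidable (Pre_merge_line line) := by
  unfold Pre_merge_line; infer_instance

def pvWitness_merge_line : List (List Int) := [[0, 0, 5, 5], [3, 1, 9, 9], [30, 0, 40, 5]]

def Spec_merge_line (line : List (List Int)) (out : List (List Int)) : Prop := out = merge_line_alt line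
instance (line : List (List Int)) (out : List (List Int)) : Decidable (Spec_merge_line line out) := by unfold Spec_merge_line; infer_instance

-- ===== CLAIM (what is proved, stated in full; the proofs are below) =====
def Claim_equal_merge_line : Prop := ∀ (line : List (List Int)), Dom_merge_line line → Pre_merge_line line → Spec_merge_line line (merge_line line)

-- ===== LEMMAS AND PROOFS =====

theorem redMin_append_singleton (l : List Int) (x : Int) (hl : l ≠ []) :
    redMin (l ++ [x]) = min (redMin l) x := by
  cases l with
  | nil => exact absurd rfl hl
  | cons h t => simp [redMin, List.foldl_append]

theorem redMax_append_singleton (l : List Int) (x : Int) (hl : l ≠ []) :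
    redMax (l ++ [x]) = max (redMax l) x := by
  cases l with
  | nil => exact absurd rfl hl
  | cons h t => simp [redMax, List.foldl_append]

theorem renderGroup_singleton (b : List Int) : renderGroup [b] = b := by
  simp [renderGroup]

-- the four coordinates of a rendered group are the group's elementwise min/min/max/max
theorem renderGroup_getD0 (g : List (List Int)) (hg : g ≠ []) :
    PySem.List.pyGetD (renderGroup g) 0 0 = redMin (g.map fun b => PySem.List.pyGetD b 0 0) := by
  match g, hg with
  | [b], _ => simp [renderGroup, redMin]
  | b1 :: b2 :: t, _ => simp [renderGroup, PySem.List.pyGetD_zero]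

theorem renderGroup_getD1 (g : List (List Int)) (hg : g ≠ []) :
    PySem.List.pyGetD (renderGroup g) 1 0 = redMin (g.map fun b => PySem.List.pyGetD b 1 0) := by
  match g, hg with
  | [b], _ => simp [renderGroup, redMin]
  | b1 :: b2 :: t, _ =>
    simp only [renderGroup]
    norm_num [PySem.List.pyGetD, PySem.List.pyGet?, PySem.List.pyIdx?]

theorem renderGroup_getD2 (g : List (List Int)) (hg : g ≠ []) :
    PySem.List.pyGetD (renderGroup g) 2 0 = redMax (g.map fun b => PySem.List.pyGetD b 2 0) := by
  match g, hg with
  | [b], _ => simp [renderGroup, redMax]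
  | b1 :: b2 :: t, _ =>
    simp only [renderGroup]
    norm_num [PySem.List.pyGetD, PySem.List.pyGet?, PySem.List.pyIdx?]
    rfl

theorem renderGroup_getD3 (g : List (List Int)) (hg : g ≠ []) :
    PySem.List.pyGetD (renderGroup g) 3 0 = redMax (g.map fun b => PySem.List.pyGetD b 3 0) := by
  match g, hg with
  | [b], _ => simp [renderGroup, redMax]
  | b1 :: b2 :: t, _ =>
    simp only [renderGroup]
    norm_num [PySem.List.pyGetD, PySem.List.pyGet?, PySem.List.pyIdx?]
    rfl

-- loop invariant: A's merged list is B's group list rendered, and B's run_max is the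
-- running max x2 of the last group
theorem loop_key : ∀ (rest : List (List Int)) (gs : List (List (List Int))) (g : List (List Int)),
    g ≠ [] →
    rest.foldl stepA ((gs ++ [g]).map renderGroup)
      = ((rest.foldl stepB (gs ++ [g], redMax (g.map fun b => PySem.List.pyGetD b 2 0))).1).map renderGroup := by
  intro rest
  induction rest with
  | nil => intro gs g hg; rfl
  | cons r rest ih =>
    intro gs g hg
    have hmap : (gs ++ [g]).map renderGroup = gs.map renderGroup ++ [renderGroup g] := by
      simp
    simp only [List.foldl_cons]
    by_cases hc : PySem.List.pyGetD r 0 0 - redMax (g.map fun b => PySem.List.pyGetD b 2 0) ≤ 10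
    · have hlen : (g ++ [r]).length ≠ 1 := by
        cases g with
        | nil => exact absurd rfl hg
        | cons a t => simp
      have hmapne : (g.map fun b => PySem.List.pyGetD b 0 0) ≠ [] := by simpa using hg
      have hmapne1 : (g.map fun b => PySem.List.pyGetD b 1 0) ≠ [] := by simpa using hg
      have hmapne2 : (g.map fun b => PySem.List.pyGetD b 2 0) ≠ [] := by simpa using hg
      have hmapne3 : (g.map fun b => PySem.List.pyGetD b 3 0) ≠ [] := by simpa using hg
      have hrg : renderGroup (g ++ [r])
          = [min (redMin (g.map fun b => PySem.List.pyGetD b 0 0)) (PySem.List.pyGetD r 0 0),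
             min (redMin (g.map fun b => PySem.List.pyGetD b 1 0)) (PySem.List.pyGetD r 1 0),
             max (redMax (g.map fun b => PySem.List.pyGetD b 2 0)) (PySem.List.pyGetD r 2 0),
             max (redMax (g.map fun b => PySem.List.pyGetD b 3 0)) (PySem.List.pyGetD r 3 0)] := by
        rw [renderGroup, if_neg hlen]
        simp only [List.map_append, List.map_cons, List.map_nil]
        rw [redMin_append_singleton _ _ hmapne, redMin_append_singleton _ _ hmapne1,
            redMax_append_singleton _ _ hmapne2, redMax_append_singleton _ _ hmapne3]
      have hA : stepA ((gs ++ [g]).map renderGroup) r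
          = ((gs ++ [g ++ [r]]).map renderGroup) := by
        rw [hmap]
        simp only [stepA, PySem.List.pyGetD_neg_one_append_singleton]
        rw [renderGroup_getD2 g hg, if_pos hc]
        rw [renderGroup_getD0 g hg, renderGroup_getD1 g hg, renderGroup_getD3 g hg,
            List.dropLast_concat, List.map_append, List.map_cons, List.map_nil, hrg]
      have hB : stepB (gs ++ [g], redMax (g.map fun b => PySem.List.pyGetD b 2 0)) r
          = (gs ++ [g ++ [r]], redMax ((g ++ [r]).map fun b => PySem.List.pyGetD b 2 0)) := by
        simp only [stepB]
        rw [if_pos ⟨by simp, hc⟩]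
        rw [List.map_append, List.map_cons, List.map_nil,
            redMax_append_singleton _ _ hmapne2]
        simp
      rw [hA, hB, ih gs (g ++ [r]) (by simp)]
    · have hA : stepA ((gs ++ [g]).map renderGroup) r
          = (((gs ++ [g]) ++ [[r]]).map renderGroup) := by
        rw [hmap]
        simp only [stepA, PySem.List.pyGetD_neg_one_append_singleton]
        rw [renderGroup_getD2 g hg, if_neg hc]
        simp [renderGroup_singleton]
      have hB : stepB (gs ++ [g], redMax (g.map fun b => PySem.List.pyGetD b 2 0)) r
          = ((gs ++ [g]) ++ [[r]], PySem.List.pyGetD r 2 0) := by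
        simp only [stepB]
        rw [if_neg (by intro h; exact hc h.2)]
      rw [hA, hB]
      have := ih (gs ++ [g]) [r] (by simp)
      simpa [redMax] using this

-- ===== VERDICT (by name: the statement is the Claim_ definition above) =====
theorem merge_line_spec : Claim_equal_merge_line := by
  intro line _ _
  unfold Spec_merge_line
  cases line with
  | nil => rfl
  | cons h t =>
    have h0 : stepB ([], 0) h = ([[h]], PySem.List.pyGetD h 2 0) := by
      simp [stepB]
    have hk := loop_key t [] [h] (by simp)
    simp only [List.nil_append, List.map_cons, List.map_nil, renderGroup_singleton] at hk
    simp only [merge_line, merge_line_alt, List.foldl_cons, h0]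
    simpa [redMax] using hk
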